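-- pv_equiv track=rewrite | github.com/echuawu/sonic-mgmt | ngts/tests/nightly/auto_negotition/conftest.py | get_matched_types
-- ===== SOURCE A (Python) =====
-- def get_matched_types(lane_number, speed_list, types_dict):
--     """
--     :param lane_number: the port number of lanes i.e, 1,2,4 etc
--     :param speed_list: set of speeds, {'40G', '25G', '50G', '10G'}
--     :param types_dict: a dictionary of port supported types based on
--     the port number of lanes
--     i.e,
--     {
--         SonicConst.PORT_LANE_NUM_1: {'CR': ['1G', '10G', '25G']},
--         SonicConst.PORT_LANE_NUM_2: {'CR2': ['50G']},
--         SonicConst.PORT_LANE_NUM_4: {'CR4': ['40G', '100G']},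
--     }
--     :return: a set of types that match speeds in the list, i.e, {'CR', 'CR4'}
--     """
--     matched_types = set()
--     lane_option = list(filter(lambda lane_option: lane_option <= lane_number, [1, 2, 4, 8]))
--     for speed in speed_list:
--         for lane in lane_option:
--             if lane in types_dict:
--                 for interface_type, supported_speeds in types_dict[lane].items():
--                     if speed in supported_speeds:
--                         matched_types.add(interface_type)
--     return matched_types
-- ===== SOURCE B (Python) =====
-- def get_matched_types(lane_number, speed_list, types_dict):
--     # Phase 1: build an inverse index speed -> [types supporting it], scanning types_dict once.
--     index = {}
--     for lane in [1, 2, 4, 8]: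
--         if lane <= lane_number and lane in types_dict:
--             for interface_type, supported_speeds in types_dict[lane].items():
--                 for speed in dict.fromkeys(supported_speeds):
--                     index.setdefault(speed, []).append(interface_type)
--     # Phase 2: one lookup per requested speed.
--     matched_types = set()
--     for speed in speed_list:
--         for interface_type in index.get(speed, []):
--             matched_types.add(interface_type)
--     return matched_types
-- ===== Notes on version B (the rewrite author's own statement) =====
-- stated objective: alternative
-- what changed: Replaces the per-speed rescan of every supported_speeds list by a one-pass inverse index speed->types followed by a direct dictionary lookup per requested speed.
import Mathlib
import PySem

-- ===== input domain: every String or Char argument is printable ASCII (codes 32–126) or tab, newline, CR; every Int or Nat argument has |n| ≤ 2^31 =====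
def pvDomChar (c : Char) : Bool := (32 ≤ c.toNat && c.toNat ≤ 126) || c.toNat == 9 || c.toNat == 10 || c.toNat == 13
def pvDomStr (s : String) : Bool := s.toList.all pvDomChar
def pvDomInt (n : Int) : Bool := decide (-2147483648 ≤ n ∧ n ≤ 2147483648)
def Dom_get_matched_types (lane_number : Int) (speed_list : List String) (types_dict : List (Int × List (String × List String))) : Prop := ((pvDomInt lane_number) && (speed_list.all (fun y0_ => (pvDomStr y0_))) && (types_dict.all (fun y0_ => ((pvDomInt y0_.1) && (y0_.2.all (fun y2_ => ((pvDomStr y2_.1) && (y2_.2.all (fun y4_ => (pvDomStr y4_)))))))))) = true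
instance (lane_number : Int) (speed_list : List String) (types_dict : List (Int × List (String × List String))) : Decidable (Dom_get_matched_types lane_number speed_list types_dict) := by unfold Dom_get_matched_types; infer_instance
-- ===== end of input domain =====

-- B builds an inverse index speed -> types once and then answers each requested speed by a direct
-- lookup, instead of A's rescan of every supported_speeds list for every speed (objective: alternative).

-- ===== PORT A =====
def get_matched_types (lane_number : Int) (speed_list : List String) (types_dict : List (Int × List (String × List String))) : List String :=
  let lane_option : List Int := ([1, 2, 4, 8] : List Int).filter (fun l => decide (l ≤ lane_number))
  speed_list.foldl (fun matched speed =>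
    lane_option.foldl (fun matched lane =>
      match PySem.Dict.get? (PySem.Dict.mk types_dict) lane with
      | none => matched
      | some items => items.foldl (fun matched e =>
          if e.2.contains speed then PySem.Set.add matched e.1 else matched) matched)
      matched) PySem.Set.empty

-- ===== PORT B =====
def get_matched_types_alt (lane_number : Int) (speed_list : List String) (types_dict : List (Int × List (String × List String))) : List String :=
  let index : PySem.Dict String (List String) :=
    ([1, 2, 4, 8] : List Int).foldl (fun idx lane =>
      if lane ≤ lane_number then
        match PySem.Dict.get? (PySem.Dict.mk types_dict) lane with
        | none => idx
        | some items => items.foldl (fun idx e =>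
            (PySem.Set.ofList e.2).foldl (fun idx s =>
              PySem.Dict.modify idx s [] (fun v => v ++ [e.1])) idx) idx
      else idx) PySem.Dict.empty
  speed_list.foldl (fun matched speed =>
    (PySem.Dict.getD index speed []).foldl (fun matched t => PySem.Set.add matched t) matched)
    PySem.Set.empty

-- ===== PRECONDITION & SPEC =====
def Spec_get_matched_types (lane_number : Int) (speed_list : List String) (types_dict : List (Int × List (String × List String))) (out : List String) : Prop := out = get_matched_types_alt lane_number speed_list types_dict
instance (lane_number : Int) (speed_list : List String) (types_dict : List (Int × List (String × List String))) (out : List String) : Decidable (Spec_get_matched_types lane_number speed_list types_dict out) := by unfold Spec_get_matched_types; infer_instance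

-- ===== CLAIM (what is proved, stated in full; the proofs are below) =====
def Claim_equal_get_matched_types : Prop := ∀ (lane_number : Int) (speed_list : List String) (types_dict : List (Int × List (String × List String))), Dom_get_matched_types lane_number speed_list types_dict → Spec_get_matched_types lane_number speed_list types_dict (get_matched_types lane_number speed_list types_dict)

-- ===== LEMMAS AND PROOFS =====

-- all (interface_type, supported_speeds) entries visible at lane_number, in A's scan order
def pvEntries (lane_number : Int) (types_dict : List (Int × List (String × List String))) : List (String × List String) :=
  (([1, 2, 4, 8] : List Int).filter (fun l => decide (l ≤ lane_number))).flatMap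
    (fun lane => (PySem.Dict.get? (PySem.Dict.mk types_dict) lane).getD [])

-- the types matching a given speed, in scan order (possibly with repeats across entries)
def pvMatch (lane_number : Int) (types_dict : List (Int × List (String × List String))) (speed : String) : List String :=
  ((pvEntries lane_number types_dict).filter (fun e => e.2.contains speed)).map (·.1)

theorem pv_foldl_flatMap {α β γ : Type} (g : α → List β) (f : γ → β → γ) :
    ∀ (l : List α) (init : γ),
      (l.flatMap g).foldl f init = l.foldl (fun acc x => (g x).foldl f acc) init := by
  intro l
  induction l with
  | nil => intro init; rfl
  | cons x xs ih => intro init; simp [List.flatMap_cons, List.foldl_append, ih]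

-- A's inner double loop, for one speed, folds Set.add over pvMatch
theorem pvA_inner (lane_number : Int) (types_dict : List (Int × List (String × List String)))
    (speed : String) (m : PySem.Set String) :
    (([1, 2, 4, 8] : List Int).filter (fun l => decide (l ≤ lane_number))).foldl
      (fun matched lane =>
        match PySem.Dict.get? (PySem.Dict.mk types_dict) lane with
        | none => matched
        | some items => items.foldl (fun matched e =>
            if e.2.contains speed then PySem.Set.add matched e.1 else matched) matched) m
    = (pvMatch lane_number types_dict speed).foldl (fun acc t => PySem.Set.add acc t) m := by
  conv_rhs => rw [pvMatch, List.foldl_map, ← PySem.List.foldl_if_eq_foldl_filter,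
    pvEntries, pv_foldl_flatMap]
  apply PySem.List.foldl_congr_mem
  intro acc lane _
  cases PySem.Dict.get? (PySem.Dict.mk types_dict) lane <;> rfl

-- B's index build, flattened into one fold over (speed, type) pairs
def pvPairs (lane_number : Int) (types_dict : List (Int × List (String × List String))) : List (String × String) :=
  (pvEntries lane_number types_dict).flatMap
    (fun e => (PySem.Set.ofList e.2).map (fun s => (s, e.1)))

theorem pvB_index (lane_number : Int) (types_dict : List (Int × List (String × List String))) :
    (([1, 2, 4, 8] : List Int).foldl (fun idx lane =>
      if lane ≤ lane_number then
        match PySem.Dict.get? (PySem.Dict.mk types_dict) lane with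
        | none => idx
        | some items => items.foldl (fun idx e =>
            (PySem.Set.ofList e.2).foldl (fun idx s =>
              PySem.Dict.modify idx s [] (fun v => v ++ [e.1])) idx) idx
      else idx) (PySem.Dict.empty : PySem.Dict String (List String)))
    = (pvPairs lane_number types_dict).foldl
        (fun d p => PySem.Dict.modify d p.1 [] (fun v => v ++ [p.2])) PySem.Dict.empty := by
  conv_rhs => rw [pvPairs, pv_foldl_flatMap, pvEntries, pv_foldl_flatMap,
    ← PySem.List.foldl_ite_eq_foldl_filter (p := fun l => l ≤ lane_number)]
  apply PySem.List.foldl_congr_mem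
  intro acc lane _
  by_cases h : lane ≤ lane_number
  · simp only [if_pos h]
    cases PySem.Dict.get? (PySem.Dict.mk types_dict) lane with
    | none => rfl
    | some items =>
      simp only [Option.getD_some]
      apply PySem.List.foldl_congr_mem
      intro acc e _
      rw [List.foldl_map]
  · simp [h]

-- filtering the nodup speed list of one entry for a given speed
theorem pv_filter_nodup (speed : String) (l : List String) (hnd : l.Nodup) :
    l.filter (fun s => s == speed) = if l.contains speed then [speed] else [] := by
  induction l with
  | nil => simp
  | cons x xs ih =>
    simp only [List.nodup_cons] at hnd
    by_cases hx : x = speed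
    · subst hx
      have hc : xs.contains x = false := by simpa using hnd.1
      rw [List.filter_cons_of_pos (by simp), ih hnd.2, hc]
      simp
    · simp [hx, ih hnd.2, Ne.symm hx]

theorem pvPairs_filter (lane_number : Int) (types_dict : List (Int × List (String × List String)))
    (speed : String) :
    ((pvPairs lane_number types_dict).filter (fun p => p.1 == speed)).map (·.2)
    = pvMatch lane_number types_dict speed := by
  rw [pvPairs, pvMatch]
  induction pvEntries lane_number types_dict with
  | nil => rfl
  | cons e es ih =>
    simp only [List.flatMap_cons, List.filter_append, List.map_append, List.filter_map,
      List.map_map, Function.comp_def]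
    rw [pv_filter_nodup speed _ (PySem.Set.nodup_ofList e.2)]
    have hmem : List.contains (PySem.Set.ofList e.2) speed = e.2.contains speed := by
      simp [List.contains_eq_mem, PySem.Set.mem_ofList]
    rw [hmem, ih]
    by_cases h : speed ∈ e.2 <;> simp [h, List.contains_eq_mem]

theorem pvB_lookup (lane_number : Int) (types_dict : List (Int × List (String × List String)))
    (speed : String) :
    PySem.Dict.getD ((pvPairs lane_number types_dict).foldl
        (fun d p => PySem.Dict.modify d p.1 [] (fun v => v ++ [p.2])) PySem.Dict.empty) speed []
    = pvMatch lane_number types_dict speed := by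
  rw [PySem.Dict.getD_foldl_modify_append, PySem.Dict.getD_empty, List.nil_append,
    pvPairs_filter]

-- ===== VERDICT (by name: the statement is the Claim_ definition above) =====
theorem get_matched_types_spec : Claim_equal_get_matched_types := by
  intro lane_number speed_list types_dict _
  show get_matched_types lane_number speed_list types_dict = get_matched_types_alt lane_number speed_list types_dict
  rw [get_matched_types, get_matched_types_alt, pvB_index]
  apply PySem.List.foldl_congr_mem
  intro acc speed _
  rw [pvA_inner, pvB_lookup]
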